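-- pv_equiv track=rewrite | github.com/IanJiang1/cryptodile | AES.py | obtain_state
-- ===== SOURCE A (Python) =====
-- def obtain_state(AES_size, input_string):
--     """loads the input string of characters into the AES state """
--     """NOTE: input string must be a string of 128 bits (16 bytes) """
--
--     if AES_size == 128:
--         nk = 4
--         nb = 4
--         nr = 10
--     elif AES_size == 192:
--         nk = 6
--         nb = 4
--         nr = 12
--     elif AES_size == 256:
--         nk = 8
--         nb = 4
--         nr = 14
--
--     state = [[]]*4
--
--     for r in range(4):
--         state[r] = list(input_string[r::4])
--
--     return state
-- ===== SOURCE B (Python) =====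
-- def obtain_state(AES_size, input_string):
--     """loads the input string of characters into the AES state """
--     """NOTE: input string must be a string of 128 bits (16 bytes) """
--     # Single forward pass: distribute each character into its row i % 4.
--     # (The nk/nb/nr block of the original is dead code and is dropped.)
--     state = [[], [], [], []]
--     for i, ch in enumerate(input_string):
--         state[i % 4].append(ch)
--     return state
-- ===== Notes on version B (the rewrite author's own statement) =====
-- stated objective: simpler
-- what changed: Replaces four strided slices input_string[r::4] (and drops the dead nk/nb/nr block) with one forward pass over enumerate(input_string) appending each character to row i % 4.
import Mathlib
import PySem

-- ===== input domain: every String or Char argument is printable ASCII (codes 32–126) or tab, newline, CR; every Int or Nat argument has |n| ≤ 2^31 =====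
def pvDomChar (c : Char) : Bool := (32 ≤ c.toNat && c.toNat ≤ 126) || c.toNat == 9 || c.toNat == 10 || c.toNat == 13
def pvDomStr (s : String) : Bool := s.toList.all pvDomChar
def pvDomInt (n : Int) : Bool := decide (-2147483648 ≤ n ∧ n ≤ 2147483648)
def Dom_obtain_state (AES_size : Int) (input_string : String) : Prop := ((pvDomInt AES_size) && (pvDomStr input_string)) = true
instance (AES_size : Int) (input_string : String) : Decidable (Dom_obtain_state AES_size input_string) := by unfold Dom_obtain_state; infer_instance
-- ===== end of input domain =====

-- B replaces A's four strided slices (and drops A's dead nk/nb/nr block) by one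
-- forward pass over enumerate, appending each character to row i % 4 (objective: simpler).


-- ===== PORT A =====
-- A's nk/nb/nr if/elif block only assigns unused locals and never raises; it has no
-- effect on the result, so the port carries no code for it.
-- slice? with step 4 is never none (step ≠ 0), so the `.getD []` is exact.
def obtain_state (AES_size : Int) (input_string : String) : List (List String) :=
  let cs := input_string.toList
  let state : List (List String) := List.replicate 4 []     -- [[]] * 4
  (PySem.List.pyRange 0 4 1).foldl
    (fun st r =>
      PySem.List.pySetD st r
        (((PySem.List.slice? cs (some r) none 4).getD []).map (fun ch => String.mk [ch])))
    state

-- ===== PORT B =====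
def obtain_state_alt (AES_size : Int) (input_string : String) : List (List String) :=
  (PySem.List.enumerate input_string.toList 0).foldl
    (fun st p => st.modify (PySem.Int.mod p.1 4).toNat (· ++ [String.mk [p.2]]))
    [[], [], [], []]

-- ===== PRECONDITION & SPEC =====
def Spec_obtain_state (AES_size : Int) (input_string : String) (out : List (List String)) : Prop := out = obtain_state_alt AES_size input_string
instance (AES_size : Int) (input_string : String) (out : List (List String)) : Decidable (Spec_obtain_state AES_size input_string out) := by unfold Spec_obtain_state; infer_instance

-- ===== CLAIM (what is proved, stated in full; the proofs are below) =====
def Claim_equal_obtain_state : Prop := ∀ (AES_size : Int) (input_string : String), Dom_obtain_state AES_size input_string → Spec_obtain_state AES_size input_string (obtain_state AES_size input_string)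

-- ===== LEMMAS AND PROOFS =====

def pvStride : Nat → List Char → List Char
  | _, [] => []
  | 0, c :: cs => c :: pvStride 3 cs
  | r + 1, _ :: cs => pvStride r cs

theorem pvStride_eq_filterMap (cs : List Char) (r : Nat) :
    pvStride r cs = (List.range cs.length).filterMap (fun k => cs[r + 4 * k]?) := by
  induction cs generalizing r with
  | nil => simp [pvStride]
  | cons c cs ih =>
    match r with
    | 0 =>
      rw [pvStride, List.length_cons, List.range_succ_eq_map, List.filterMap_cons]
      simp only [List.filterMap_map]
      have he : ∀ k, ((fun k => (c :: cs)[0 + 4 * k]?) ∘ Nat.succ) k = cs[3 + 4 * k]? := by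
        intro k
        have h : 0 + 4 * (k + 1) = (3 + 4 * k) + 1 := by omega
        simp only [Function.comp, Nat.succ_eq_add_one, h, List.getElem?_cons_succ]
      rw [List.filterMap_congr (fun k _ => he k)]
      simp [ih 3]
    | r + 1 =>
      rw [pvStride, List.length_cons, List.range_succ, List.filterMap_append]
      have hlast : (c :: cs)[r + 1 + 4 * cs.length]? = none := by
        apply List.getElem?_eq_none
        simp; omega
      have he : ∀ k, (c :: cs)[r + 1 + 4 * k]? = cs[r + 4 * k]? := by
        intro k
        have h : r + 1 + 4 * k = (r + 4 * k) + 1 := by omega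
        rw [h, List.getElem?_cons_succ]
      simp only [List.filterMap_cons, hlast, List.filterMap_nil, List.append_nil]
      rw [List.filterMap_congr (fun k _ => he k)]
      exact ih r

theorem filterMap_range_ext {α : Type} (f : Nat → Option α) (a b : Nat) (hab : a ≤ b)
    (h : ∀ k, a ≤ k → f k = none) :
    List.filterMap f (List.range b) = List.filterMap f (List.range a) := by
  have hb : b = a + (b - a) := by omega
  rw [hb, List.range_add, List.filterMap_append]
  have : List.filterMap f (List.map (a + ·) (List.range (b - a))) = [] := by
    simp only [List.filterMap_map]
    rw [List.filterMap_eq_nil_iff]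
    intro k _
    exact h (a + k) (by omega)
  rw [this, List.append_nil]

theorem slice?_eq_stride (cs : List Char) (r : Nat) :
    PySem.List.slice? cs (some (r : Int)) none 4 = some (pvStride r cs) := by
  rw [PySem.List.slice?]
  simp only [PySem.List.sliceIndices]
  have h40 : ¬ ((4:Int) = 0) := by norm_num
  have h4n : ¬ ((4:Int) < 0) := by norm_num
  have h4p : (0:Int) < 4 := by norm_num
  have hr0 : ¬ ((r:Int) < 0) := by omega
  simp only [if_neg h40, if_neg h4n, if_pos h4p, if_neg hr0]
  rcases Nat.lt_or_ge r cs.length with hlt | hle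
  · have hmin : min (r:Int) (cs.length:Int) = (r:Int) := by omega
    rw [hmin, if_pos (by omega)]
    simp only [Option.some.injEq]
    set cnt : Nat := (((cs.length:Int) - r + 4 - 1) / 4).toNat with hcnt
    have he : ∀ k : Nat, cs[((r:Int) + 4 * ((k:Nat):Int)).toNat]? = cs[r + 4 * k]? := by
      intro k
      congr 1
    rw [List.filterMap_congr (fun k _ => he k), pvStride_eq_filterMap]
    symm
    apply filterMap_range_ext
    · omega
    · intro k hk
      apply List.getElem?_eq_none
      omega
  · have hmin : min (r:Int) (cs.length:Int) = (cs.length:Int) := by omega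
    rw [hmin, if_neg (by omega)]
    simp only [List.range_zero, List.filterMap_nil, Option.some.injEq]
    rw [pvStride_eq_filterMap]
    symm
    rw [List.filterMap_eq_nil_iff]
    intro k _
    apply List.getElem?_eq_none
    omega
def pvRow (r : Nat) (cs : List Char) : List String :=
  (pvStride r cs).map (fun ch => String.mk [ch])

theorem pvStride_zero (c : Char) (cs : List Char) : pvStride 0 (c :: cs) = c :: pvStride 3 cs := rfl
theorem pvStride_one (c : Char) (cs : List Char) : pvStride 1 (c :: cs) = pvStride 0 cs := rfl
theorem pvStride_two (c : Char) (cs : List Char) : pvStride 2 (c :: cs) = pvStride 1 cs := rfl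
theorem pvStride_three (c : Char) (cs : List Char) : pvStride 3 (c :: cs) = pvStride 2 cs := rfl

theorem foldB (cs : List Char) (s : Nat) (a b c d : List String) :
    (PySem.List.enumerate cs (s : Int)).foldl
      (fun st p => st.modify (PySem.Int.mod p.1 4).toNat (· ++ [String.mk [p.2]]))
      [a, b, c, d]
    = [a ++ pvRow ((0 + 4 - s % 4) % 4) cs, b ++ pvRow ((1 + 4 - s % 4) % 4) cs,
       c ++ pvRow ((2 + 4 - s % 4) % 4) cs, d ++ pvRow ((3 + 4 - s % 4) % 4) cs] := by
  induction cs generalizing s a b c d with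
  | nil => simp [PySem.List.enumerate, pvRow, pvStride]
  | cons x cs ih =>
    rw [PySem.List.enumerate_cons, List.foldl_cons]
    have hm : (PySem.Int.mod (s : Int) 4).toNat = s % 4 := by
      rw [PySem.Int.mod_eq_emod_of_pos (by norm_num : (0:Int) < 4)]
      omega
    have hs1 : ((s : Int) + 1) = ((s + 1 : Nat) : Int) := by push_cast; ring
    simp only [hm, hs1]
    set u := String.mk [x] with hu
    have h4 : s % 4 = 0 ∨ s % 4 = 1 ∨ s % 4 = 2 ∨ s % 4 = 3 := by omega
    rcases h4 with h4 | h4 | h4 | h4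
    · have h5 : (s + 1) % 4 = 1 := by omega
      rw [h4]
      have hmod : List.modify [a, b, c, d] 0 (· ++ [u]) = [a ++ [u], b, c, d] := rfl
      rw [hmod, ih]
      norm_num [h5, hu, pvRow, pvStride_zero, pvStride_one, pvStride_two, pvStride_three]
    · have h5 : (s + 1) % 4 = 2 := by omega
      rw [h4]
      have hmod : List.modify [a, b, c, d] 1 (· ++ [u]) = [a, b ++ [u], c, d] := rfl
      rw [hmod, ih]
      norm_num [h5, hu, pvRow, pvStride_zero, pvStride_one, pvStride_two, pvStride_three]
    · have h5 : (s + 1) % 4 = 3 := by omega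
      rw [h4]
      have hmod : List.modify [a, b, c, d] 2 (· ++ [u]) = [a, b, c ++ [u], d] := rfl
      rw [hmod, ih]
      norm_num [h5, hu, pvRow, pvStride_zero, pvStride_one, pvStride_two, pvStride_three]
    · have h5 : (s + 1) % 4 = 0 := by omega
      rw [h4]
      have hmod : List.modify [a, b, c, d] 3 (· ++ [u]) = [a, b, c, d ++ [u]] := rfl
      rw [hmod, ih]
      norm_num [h5, hu, pvRow, pvStride_zero, pvStride_one, pvStride_two, pvStride_three]

-- ===== VERDICT (by name: the statement is the Claim_ definition above) =====
theorem obtain_state_spec : Claim_equal_obtain_state := by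
  intro AES_size input_string _
  unfold Spec_obtain_state obtain_state obtain_state_alt
  have hB := foldB input_string.toList 0 [] [] [] []
  simp only [Nat.cast_zero, Nat.zero_mod, Nat.sub_zero, Nat.reduceAdd, Nat.reduceMod] at hB
  rw [hB]
  have hr : PySem.List.pyRange 0 4 1 = [0, 1, 2, 3] := by decide
  rw [hr]
  have h0 := slice?_eq_stride input_string.toList 0
  have h1 := slice?_eq_stride input_string.toList 1
  have h2 := slice?_eq_stride input_string.toList 2
  have h3 := slice?_eq_stride input_string.toList 3
  norm_num at h0 h1 h2 h3
  simp [List.foldl, h0, h1, h2, h3, pvRow, List.replicate, PySem.List.pySetD,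
    PySem.List.pySet?, PySem.List.pyIdx?]
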